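-- pv_equiv track=rewrite | github.com/Mbstudio101/Karchain | backend/scrapers/nba_biostats_analyzer.py | categorize_headers
-- ===== SOURCE A (Python) =====
-- from typing import Dict, List, Optional, Any
--
-- def categorize_headers(headers: List[str]) -> Dict[str, List[str]]:
--     """Categorize headers by type"""
--     categories = {
--         "player_info": [],
--         "traditional_stats": [],
--         "advanced_stats": [],
--         "physical_stats": [],
--         "experience_stats": [],
--         "other": []
--     }
--
--     for header in headers:
--         header_lower = header.lower()
--
--         if any(term in header_lower for term in ['player', 'name', 'team', 'id']):
--             categories["player_info"].append(header)
--         elif any(term in header_lower for term in ['age', 'height', 'weight', 'years']):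
--             categories["physical_stats"].append(header)
--         elif any(term in header_lower for term in ['gp', 'min', 'pts', 'reb', 'ast', 'fg', 'ft', '3p']):
--             categories["traditional_stats"].append(header)
--         elif any(term in header_lower for term in ['per', 'usage', 'ts', 'efg', 'ws', 'bpm']):
--             categories["advanced_stats"].append(header)
--         elif any(term in header_lower for term in ['draft', 'exp', 'season']):
--             categories["experience_stats"].append(header)
--         else:
--             categories["other"].append(header)
--
--     return categories
-- ===== SOURCE B (Python) =====
-- # Staged-partition re-implementation: instead of classifying each header once in a
-- # single pass, repeatedly split a shrinking "remaining" list per category, in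
-- # priority order; whatever survives every stage is "other".
-- _PRIORITY = [
--     ("player_info", ('player', 'name', 'team', 'id')),
--     ("physical_stats", ('age', 'height', 'weight', 'years')),
--     ("traditional_stats", ('gp', 'min', 'pts', 'reb', 'ast', 'fg', 'ft', '3p')),
--     ("advanced_stats", ('per', 'usage', 'ts', 'efg', 'ws', 'bpm')),
--     ("experience_stats", ('draft', 'exp', 'season')),
-- ]
--
-- _ORDER = ["player_info", "traditional_stats", "advanced_stats",
--           "physical_stats", "experience_stats", "other"]
--
--
-- def categorize_headers(headers):
--     """Categorize headers by type"""
--     picked = {}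
--     remaining = list(headers)
--     for key, terms in _PRIORITY:
--         matched = []
--         rest = []
--         for h in remaining:
--             hl = h.lower()
--             (matched if any(t in hl for t in terms) else rest).append(h)
--         picked[key] = matched
--         remaining = rest
--     picked["other"] = remaining
--     return {k: picked[k] for k in _ORDER}
-- ===== Notes on version B (the rewrite author's own statement) =====
-- stated objective: alternative
-- what changed: Replaces A's single pass with a six-way if/elif chain appending into a mutated dict by staged partitioning: for each category in priority order, one pass splits a shrinking remainder list into that category's matches and the rest; leftovers become 'other', and the dict is assembled per category at the end.
import Mathlib
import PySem

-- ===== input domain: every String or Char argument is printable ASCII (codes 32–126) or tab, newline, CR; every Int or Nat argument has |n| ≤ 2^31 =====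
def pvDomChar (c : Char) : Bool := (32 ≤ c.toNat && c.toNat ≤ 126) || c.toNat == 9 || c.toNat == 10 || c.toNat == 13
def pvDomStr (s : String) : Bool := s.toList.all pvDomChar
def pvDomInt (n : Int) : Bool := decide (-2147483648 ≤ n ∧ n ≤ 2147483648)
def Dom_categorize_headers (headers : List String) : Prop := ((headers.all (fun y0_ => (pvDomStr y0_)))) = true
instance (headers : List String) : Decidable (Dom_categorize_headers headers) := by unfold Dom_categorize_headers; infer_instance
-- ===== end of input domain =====

-- B replaces A's single-pass if/elif chain into a mutated dict by staged partitioning: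
-- per priority category one pass splits a shrinking remainder; objective: alternative.

-- ===== PORT A =====
-- one iteration of A's for-loop: the if/elif chain appending into the dict
def pvStepA (d : PySem.Dict String (List String)) (header : String) : PySem.Dict String (List String) :=
  let header_lower := PySem.Str.lower header
  if ["player", "name", "team", "id"].any (fun term => PySem.Str.isIn term header_lower) then
    d.modify "player_info" [] (· ++ [header])
  else if ["age", "height", "weight", "years"].any (fun term => PySem.Str.isIn term header_lower) then
    d.modify "physical_stats" [] (· ++ [header])
  else if ["gp", "min", "pts", "reb", "ast", "fg", "ft", "3p"].any (fun term => PySem.Str.isIn term header_lower) then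
    d.modify "traditional_stats" [] (· ++ [header])
  else if ["per", "usage", "ts", "efg", "ws", "bpm"].any (fun term => PySem.Str.isIn term header_lower) then
    d.modify "advanced_stats" [] (· ++ [header])
  else if ["draft", "exp", "season"].any (fun term => PySem.Str.isIn term header_lower) then
    d.modify "experience_stats" [] (· ++ [header])
  else
    d.modify "other" [] (· ++ [header])

def categorize_headers (headers : List String) : List (String × List String) :=
  let categories : PySem.Dict String (List String) :=
    ((((((PySem.Dict.empty.insert "player_info" []).insert "traditional_stats" []).insert
        "advanced_stats" []).insert "physical_stats" []).insert "experience_stats" []).insert "other" [])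
  (headers.foldl pvStepA categories).items

-- ===== PORT B =====
def pvPriority : List (String × List String) :=
  [("player_info", ["player", "name", "team", "id"]),
   ("physical_stats", ["age", "height", "weight", "years"]),
   ("traditional_stats", ["gp", "min", "pts", "reb", "ast", "fg", "ft", "3p"]),
   ("advanced_stats", ["per", "usage", "ts", "efg", "ws", "bpm"]),
   ("experience_stats", ["draft", "exp", "season"])]

def pvOrder : List String :=
  ["player_info", "traditional_stats", "advanced_stats", "physical_stats", "experience_stats", "other"]

-- the inner per-stage pass: split 'remaining' into (matched, rest)
def pvSplit (terms : List String) (remaining : List String) : List String × List String :=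
  remaining.foldl (fun p h =>
    let hl := PySem.Str.lower h
    if terms.any (fun t => PySem.Str.isIn t hl) then (p.1 ++ [h], p.2) else (p.1, p.2 ++ [h]))
    ([], [])

def categorize_headers_alt (headers : List String) : List (String × List String) :=
  let fin := pvPriority.foldl
    (fun (st : PySem.Dict String (List String) × List String) e =>
      let mr := pvSplit e.2 st.2
      (st.1.insert e.1 mr.1, mr.2))
    (PySem.Dict.empty, headers)
  let picked := fin.1.insert "other" fin.2
  pvOrder.map (fun k => (k, picked.getD k []))

-- ===== PRECONDITION & SPEC =====
def Spec_categorize_headers (headers : List String) (out : List (String × List String)) : Prop := out = categorize_headers_alt headers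
instance (headers : List String) (out : List (String × List String)) : Decidable (Spec_categorize_headers headers out) := by unfold Spec_categorize_headers; infer_instance

-- ===== CLAIM (what is proved, stated in full; the proofs are below) =====
def Claim_equal_categorize_headers : Prop := ∀ (headers : List String), Dom_categorize_headers headers → Spec_categorize_headers headers (categorize_headers headers)

-- ===== LEMMAS AND PROOFS =====

-- the five matching predicates, in A's branch order
def pvB1 (h : String) : Bool := ["player", "name", "team", "id"].any (fun t => PySem.Str.isIn t (PySem.Str.lower h))
def pvB2 (h : String) : Bool := ["age", "height", "weight", "years"].any (fun t => PySem.Str.isIn t (PySem.Str.lower h))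
def pvB3 (h : String) : Bool := ["gp", "min", "pts", "reb", "ast", "fg", "ft", "3p"].any (fun t => PySem.Str.isIn t (PySem.Str.lower h))
def pvB4 (h : String) : Bool := ["per", "usage", "ts", "efg", "ws", "bpm"].any (fun t => PySem.Str.isIn t (PySem.Str.lower h))
def pvB5 (h : String) : Bool := ["draft", "exp", "season"].any (fun t => PySem.Str.isIn t (PySem.Str.lower h))

-- the split pass accumulates a pair of filters (stated for an abstract predicate)
lemma pvSplitGen (q : String → Bool) (l : List String) : ∀ (a b : List String),
    l.foldl (fun (p : List String × List String) h =>
      if q h then (p.1 ++ [h], p.2) else (p.1, p.2 ++ [h])) (a, b)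
    = (a ++ l.filter q, b ++ l.filter (fun h => !q h)) := by
  induction l with
  | nil => simp
  | cons h t ih =>
    intro a b
    rw [List.foldl_cons]
    by_cases hm : q h = true <;>
      simp [hm, ih]

lemma pvSplit_eq (terms l : List String) :
    pvSplit terms l
    = (l.filter (fun h => terms.any (fun t => PySem.Str.isIn t (PySem.Str.lower h))),
       l.filter (fun h => !terms.any (fun t => PySem.Str.isIn t (PySem.Str.lower h)))) :=
  pvSplitGen (fun h => terms.any (fun t => PySem.Str.isIn t (PySem.Str.lower h))) l [] []

-- one loop iteration of A, rewritten as a single modify picked by the branch booleans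
lemma pvStep_eq (d : PySem.Dict String (List String)) (h : String) :
    pvStepA d h =
      d.modify
        (if pvB1 h then "player_info" else if pvB2 h then "physical_stats"
         else if pvB3 h then "traditional_stats" else if pvB4 h then "advanced_stats"
         else if pvB5 h then "experience_stats" else "other") [] (· ++ [h]) := by
  unfold pvStepA pvB1 pvB2 pvB3 pvB4 pvB5
  dsimp only
  split_ifs <;> rfl

def pvMk (g1 g2 g3 g4 g5 g6 : List String) : PySem.Dict String (List String) :=
  PySem.Dict.mk [("player_info", g1), ("traditional_stats", g2), ("advanced_stats", g3),
    ("physical_stats", g4), ("experience_stats", g5), ("other", g6)]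

lemma pvMod1 (g1 g2 g3 g4 g5 g6 : List String) (h : String) :
    (pvMk g1 g2 g3 g4 g5 g6).modify "player_info" [] (· ++ [h]) = pvMk (g1 ++ [h]) g2 g3 g4 g5 g6 := rfl
lemma pvMod2 (g1 g2 g3 g4 g5 g6 : List String) (h : String) :
    (pvMk g1 g2 g3 g4 g5 g6).modify "traditional_stats" [] (· ++ [h]) = pvMk g1 (g2 ++ [h]) g3 g4 g5 g6 := rfl
lemma pvMod3 (g1 g2 g3 g4 g5 g6 : List String) (h : String) :
    (pvMk g1 g2 g3 g4 g5 g6).modify "advanced_stats" [] (· ++ [h]) = pvMk g1 g2 (g3 ++ [h]) g4 g5 g6 := rfl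
lemma pvMod4 (g1 g2 g3 g4 g5 g6 : List String) (h : String) :
    (pvMk g1 g2 g3 g4 g5 g6).modify "physical_stats" [] (· ++ [h]) = pvMk g1 g2 g3 (g4 ++ [h]) g5 g6 := rfl
lemma pvMod5 (g1 g2 g3 g4 g5 g6 : List String) (h : String) :
    (pvMk g1 g2 g3 g4 g5 g6).modify "experience_stats" [] (· ++ [h]) = pvMk g1 g2 g3 g4 (g5 ++ [h]) g6 := rfl
lemma pvMod6 (g1 g2 g3 g4 g5 g6 : List String) (h : String) :
    (pvMk g1 g2 g3 g4 g5 g6).modify "other" [] (· ++ [h]) = pvMk g1 g2 g3 g4 g5 (g6 ++ [h]) := rfl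

-- the loop invariant for A: folding the step over t appends the six filtered lists,
-- with the conditions written in the nesting order B's staged filters produce
lemma pv_loop (t : List String) : ∀ (g1 g2 g3 g4 g5 g6 : List String),
    (t.foldl pvStepA (pvMk g1 g2 g3 g4 g5 g6)).items
    = [("player_info", g1 ++ t.filter (fun h => pvB1 h)),
       ("traditional_stats", g2 ++ t.filter (fun h => pvB3 h && (!pvB2 h && !pvB1 h))),
       ("advanced_stats", g3 ++ t.filter (fun h => pvB4 h && (!pvB3 h && (!pvB2 h && !pvB1 h)))),
       ("physical_stats", g4 ++ t.filter (fun h => pvB2 h && !pvB1 h)),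
       ("experience_stats", g5 ++ t.filter (fun h => pvB5 h && (!pvB4 h && (!pvB3 h && (!pvB2 h && !pvB1 h))))),
       ("other", g6 ++ t.filter (fun h => !pvB5 h && (!pvB4 h && (!pvB3 h && (!pvB2 h && !pvB1 h)))))] := by
  induction t with
  | nil => intro g1 g2 g3 g4 g5 g6; simp [pvMk]
  | cons h t ih =>
    intro g1 g2 g3 g4 g5 g6
    rw [List.foldl_cons, pvStep_eq]
    cases hb1 : pvB1 h <;> cases hb2 : pvB2 h <;> cases hb3 : pvB3 h <;>
      cases hb4 : pvB4 h <;> cases hb5 : pvB5 h <;>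
      simp [hb1, hb2, hb3, hb4, hb5, pvMod1, pvMod2, pvMod3, pvMod4, pvMod5, pvMod6, ih]

-- ===== VERDICT (by name: the statement is the Claim_ definition above) =====
set_option maxHeartbeats 1000000 in
theorem categorize_headers_spec : Claim_equal_categorize_headers := by
  intro headers _
  unfold Spec_categorize_headers
  have hA : categorize_headers headers
      = (headers.foldl pvStepA (pvMk [] [] [] [] [] [])).items := rfl
  rw [hA, pv_loop]
  unfold categorize_headers_alt
  simp only [pvPriority, pvOrder, List.foldl_cons, List.foldl_nil, pvSplit_eq,
    List.filter_filter]
  simp [pvB1, pvB2, pvB3, pvB4, pvB5, PySem.Dict.insert, PySem.Dict.empty,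
    PySem.Dict.contains, PySem.Dict.getD, PySem.Dict.get?]
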